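-- pv_equiv track=rewrite | github.com/rv-fgalindo/advent-of-code-2023 | Tavio/challenge3.py | check_sides_part_two
-- ===== SOURCE A (Python) =====
-- def check_sides_part_two(sym_idx: int, line: str, list_idx: int):
--     nums_found = []
--     if sym_idx != 0 and line[sym_idx - 1].isdigit():  # Left side
--         num = ""
--         for char_idx in range(sym_idx - 1, -1, -1):
--             current_num = line[char_idx]
--             if current_num.isdigit():
--                 num += line[char_idx]
--             else:
--                 break
--         value = int(num[::-1]) if num != "" else 0
--         nums_found.append(value)
--     if sym_idx != len(line) - 1 and line[sym_idx + 1].isdigit():  # Right side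
--         num = ""
--         for char_idx in range(sym_idx + 1, len(line)):
--             current_num = line[char_idx]
--             if current_num.isdigit():
--                 num += line[char_idx]
--             else:
--                 break
--         value = int(num) if num != "" else 0
--         nums_found.append(value)
--     return nums_found
-- ===== SOURCE B (Python) =====
-- def _digit_run_len(chars):
--     # length of the leading run of digit characters of an iterable of chars
--     n = 0
--     for c in chars:
--         if not c.isdigit():
--             break
--         n += 1
--     return n
--
--
-- def check_sides_part_two(sym_idx: int, line: str, list_idx: int):
--     left = line[:sym_idx]
--     right = line[sym_idx + 1:]
--     tail = left[len(left) - _digit_run_len(reversed(left)):]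
--     head = right[:_digit_run_len(right)]
--     nums_found = []
--     if tail:
--         nums_found.append(int(tail))
--     if head:
--         nums_found.append(int(head))
--     return nums_found
-- ===== Notes on version B (the rewrite author's own statement) =====
-- stated objective: simpler
-- what changed: B slices the line into left/right parts around sym_idx and extracts the trailing/leading digit run of each slice with one shared run-length helper, replacing A's two guarded index-arithmetic scan loops with manual break, string concatenation, reversal and a 0 sentinel.
-- outside the precondition, e.g. on check_sides_part_two(-1, '12', 0): A returns [0, 12], B returns [1, 12]; on check_sides_part_two(-2, '975', 0): A returns [0, 5975], B returns [9, 5]; on check_sides_part_two(5, '12', 0): A raises IndexError, B returns [12]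
import Mathlib
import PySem

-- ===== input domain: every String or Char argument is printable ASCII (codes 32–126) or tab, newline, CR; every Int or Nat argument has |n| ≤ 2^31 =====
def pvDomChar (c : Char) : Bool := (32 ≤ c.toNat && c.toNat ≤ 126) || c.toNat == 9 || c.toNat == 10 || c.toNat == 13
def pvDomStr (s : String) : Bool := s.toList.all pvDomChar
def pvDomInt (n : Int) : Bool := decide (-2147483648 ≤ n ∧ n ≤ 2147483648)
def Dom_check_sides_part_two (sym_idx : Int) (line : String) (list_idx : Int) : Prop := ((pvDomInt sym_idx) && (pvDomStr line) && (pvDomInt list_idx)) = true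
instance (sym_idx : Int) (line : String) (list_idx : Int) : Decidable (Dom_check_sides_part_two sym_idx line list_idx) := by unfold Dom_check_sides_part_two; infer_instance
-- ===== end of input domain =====

-- B replaces A's two guarded index-arithmetic scan loops (manual break, string concatenation, reversal,
-- 0 sentinel) by slicing the line around sym_idx and taking the trailing/leading digit run of each slice
-- with one shared run-length helper (objective: simpler).


-- ===== PORT A =====
-- A's for-loop with break over an index range: walks the indices, appends digit chars to num, stops at
-- the first non-digit (the 'none' branch is Python's IndexError, unreachable inside Pre_)
def pvALoop (l : List Char) : List Int → List Char → List Char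
  | [], num => num
  | i :: rest, num =>
    match PySem.List.pyGet? l i with
    | some c => if PySem.Chars.isdigit c then pvALoop l rest (num ++ [c]) else num
    | none => num

def check_sides_part_two (sym_idx : Int) (line : String) (list_idx : Int) : List Int :=
  let l := line.toList
  let nums₁ : List Int :=
    if sym_idx ≠ 0 ∧ (match PySem.List.pyGet? l (sym_idx - 1) with
                      | some c => PySem.Chars.isdigit c
                      | none => false) = true then
      let num := pvALoop l (PySem.List.pyRange (sym_idx - 1) (-1) (-1)) []
      let value : Int := if num ≠ [] then (PySem.Int.ofChars? num.reverse).getD 0 else 0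
      [value]
    else []
  let nums₂ : List Int :=
    if sym_idx ≠ (l.length : Int) - 1 ∧ (match PySem.List.pyGet? l (sym_idx + 1) with
                                         | some c => PySem.Chars.isdigit c
                                         | none => false) = true then
      let num := pvALoop l (PySem.List.pyRange (sym_idx + 1) (l.length : Int) 1) []
      let value : Int := if num ≠ [] then (PySem.Int.ofChars? num).getD 0 else 0
      [value]
    else []
  nums₁ ++ nums₂

-- ===== PORT B =====
-- _digit_run_len: length of the leading digit run (for-loop with break and a counter);
-- Python's reversed(left) is ported as List.reverse (exact)
def pvDigitRunLenGo : List Char → Int → Int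
  | [], n => n
  | c :: rest, n => if ¬ PySem.Chars.isdigit c then n else pvDigitRunLenGo rest (n + 1)

def pvDigitRunLen (cs : List Char) : Int := pvDigitRunLenGo cs 0

def check_sides_part_two_alt (sym_idx : Int) (line : String) (list_idx : Int) : List Int :=
  let l := line.toList
  let left := PySem.List.slice l none (some sym_idx)
  let right := PySem.List.slice l (some (sym_idx + 1)) none
  let tail := PySem.List.slice left (some ((left.length : Int) - pvDigitRunLen left.reverse)) none
  let head := PySem.List.slice right none (some (pvDigitRunLen right))
  (if tail ≠ [] then [(PySem.Int.ofChars? tail).getD 0] else []) ++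
  (if head ≠ [] then [(PySem.Int.ofChars? head).getD 0] else [])

-- ===== PRECONDITION & SPEC =====
-- Pre_ keeps the natural domain: sym_idx an in-range position of line, plus those negative sym_idx whose
-- two (wrap-around) neighbour characters are non-digits (both programs return [] there).  It excludes
-- out-of-range sym_idx, on which A raises IndexError, and negative sym_idx with a digit neighbour, on
-- which A's values are accidents of Python negative-index wraparound (a sentinel 0 from an empty
-- backward scan, a rescan of the line's start).
def Pre_check_sides_part_two (sym_idx : Int) (line : String) (list_idx : Int) : Prop :=
  (0 ≤ sym_idx ∧ sym_idx < (line.toList.length : Int)) ∨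
  (1 - (line.toList.length : Int) ≤ sym_idx ∧ sym_idx < 0 ∧
   (PySem.List.pyGet? line.toList (sym_idx - 1)).all (fun c => !(PySem.Chars.isdigit c)) = true ∧
   (PySem.List.pyGet? line.toList (sym_idx + 1)).all (fun c => !(PySem.Chars.isdigit c)) = true)
instance (sym_idx : Int) (line : String) (list_idx : Int) : Decidable (Pre_check_sides_part_two sym_idx line list_idx) := by unfold Pre_check_sides_part_two; infer_instance

def pvWitness_check_sides_part_two : Int × String × Int := (1, "4*15", 0)

def Spec_check_sides_part_two (sym_idx : Int) (line : String) (list_idx : Int) (out : List Int) : Prop := out = check_sides_part_two_alt sym_idx line list_idx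
instance (sym_idx : Int) (line : String) (list_idx : Int) (out : List Int) : Decidable (Spec_check_sides_part_two sym_idx line list_idx out) := by unfold Spec_check_sides_part_two; infer_instance

-- ===== CLAIM (what is proved, stated in full; the proofs are below) =====
def Claim_equal_check_sides_part_two : Prop := ∀ (sym_idx : Int) (line : String) (list_idx : Int), Dom_check_sides_part_two sym_idx line list_idx → Pre_check_sides_part_two sym_idx line list_idx → Spec_check_sides_part_two sym_idx line list_idx (check_sides_part_two sym_idx line list_idx)

-- ===== LEMMAS AND PROOFS =====

-- B's run-length counter counts the leading digit run
theorem pvDigitRunLenGo_eq (cs : List Char) (n : Int) :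
    pvDigitRunLenGo cs n = n + ((cs.takeWhile PySem.Chars.isdigit).length : Int) := by
  induction cs generalizing n with
  | nil => simp [pvDigitRunLenGo]
  | cons c rest ih =>
    by_cases h : PySem.Chars.isdigit c
    · simp [pvDigitRunLenGo, h, ih]; ring
    · simp [pvDigitRunLenGo, h]

theorem pvDigitRunLen_eq (cs : List Char) :
    pvDigitRunLen cs = ((cs.takeWhile PySem.Chars.isdigit).length : Int) := by
  simp [pvDigitRunLen, pvDigitRunLenGo_eq]

-- A's backward scan from index i-1 down to 0 collects the trailing digit run of (l.take i), reversed
theorem pvALoop_down (l : List Char) (i : Nat) (hi : i ≤ l.length) (acc : List Char) :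
    pvALoop l (PySem.List.pyRange ((i : Int) - 1) (-1) (-1)) acc
      = acc ++ ((l.take i).reverse.takeWhile PySem.Chars.isdigit) := by
  induction i generalizing acc with
  | zero => simp [pvALoop]
  | succ k ih =>
    have hk : k < l.length := by omega
    rw [show ((k + 1 : Nat) : Int) - 1 = (k : Int) by push_cast; ring]
    rw [PySem.List.pyRange_neg_one_cons (by omega)]
    rw [pvALoop]
    rw [PySem.List.pyGet?_natCast]
    simp only [List.getElem?_eq_getElem hk]
    have htake : (l.take (k + 1)).reverse = l[k] :: (l.take k).reverse := by
      rw [List.take_add_one, List.getElem?_eq_getElem hk]; simp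
    rw [htake]
    by_cases h : PySem.Chars.isdigit l[k]
    · simp only [if_true, List.takeWhile_cons, h]
      rw [ih (by omega)]
      simp
    · simp [h]

-- A's forward scan from index i up to the end collects the leading digit run of (l.drop i)
theorem pvALoop_up (l : List Char) (i : Nat) (hi : i ≤ l.length) (acc : List Char) :
    pvALoop l (PySem.List.pyRange ((i : Int)) ((l.length : Int)) 1) acc
      = acc ++ ((l.drop i).takeWhile PySem.Chars.isdigit) := by
  induction h : l.length - i generalizing i acc with
  | zero =>
    have : i = l.length := by omega
    subst this
    simp [PySem.List.pyRange_one_eq_nil (le_refl _), pvALoop]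
  | succ k ih =>
    have hk : i < l.length := by omega
    rw [PySem.List.pyRange_one_cons (by exact_mod_cast hk)]
    rw [pvALoop, PySem.List.pyGet?_natCast]
    simp only [List.getElem?_eq_getElem hk]
    have hdrop : l.drop i = l[i] :: l.drop (i + 1) := List.drop_eq_getElem_cons hk
    rw [hdrop]
    by_cases h2 : PySem.Chars.isdigit l[i]
    · simp only [List.takeWhile_cons]
      rw [show (i : Int) + 1 = ((i + 1 : Nat) : Int) by push_cast; ring]
      rw [ih (i + 1) (by omega) _ (by omega)]
      simp [h2]
    · simp [h2]

-- taking the first (takeWhile p).length elements is takeWhile p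
theorem pvTake_takeWhile_len (cs : List Char) (p : Char → Bool) :
    cs.take ((cs.takeWhile p).length) = cs.takeWhile p := by
  induction cs with
  | nil => simp
  | cons c rest ih => by_cases h : p c <;> simp [h, ih]

-- dropping all but the trailing p-run leaves the trailing p-run
theorem pvDrop_sub_takeWhile (cs : List Char) (p : Char → Bool) :
    cs.drop (cs.length - (cs.reverse.takeWhile p).length) = (cs.reverse.takeWhile p).reverse := by
  have h1 : cs = (cs.reverse.dropWhile p).reverse ++ (cs.reverse.takeWhile p).reverse := by
    rw [← List.reverse_append, List.takeWhile_append_dropWhile, List.reverse_reverse]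
  have hlen : cs.length - (cs.reverse.takeWhile p).length = ((cs.reverse.dropWhile p).reverse).length := by
    have h2 := congrArg List.length h1
    simp only [List.length_append, List.length_reverse] at h2 ⊢
    omega
  have h3 : ((cs.reverse.dropWhile p).reverse ++ (cs.reverse.takeWhile p).reverse).drop
      ((cs.reverse.dropWhile p).reverse.length) = (cs.reverse.takeWhile p).reverse := by
    simp
  rw [← h1] at h3
  rw [hlen]
  exact h3

-- B in canonical form: the two slices' trailing/leading digit runs
theorem pvAlt_canon (sym_idx : Int) (line : String) (list_idx : Int) :
    check_sides_part_two_alt sym_idx line list_idx =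
      (if ((PySem.List.slice line.toList none (some sym_idx)).reverse.takeWhile PySem.Chars.isdigit).reverse ≠ [] then
         [(PySem.Int.ofChars? ((PySem.List.slice line.toList none (some sym_idx)).reverse.takeWhile PySem.Chars.isdigit).reverse).getD 0]
       else []) ++
      (if (PySem.List.slice line.toList (some (sym_idx + 1)) none).takeWhile PySem.Chars.isdigit ≠ [] then
         [(PySem.Int.ofChars? ((PySem.List.slice line.toList (some (sym_idx + 1)) none).takeWhile PySem.Chars.isdigit)).getD 0]
       else []) := by
  simp only [check_sides_part_two_alt]
  rw [pvDigitRunLen_eq, pvDigitRunLen_eq]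
  have hle : (((PySem.List.slice line.toList none (some sym_idx)).reverse.takeWhile PySem.Chars.isdigit).length)
      ≤ (PySem.List.slice line.toList none (some sym_idx)).length := by
    simpa using (List.takeWhile_sublist (p := PySem.Chars.isdigit)
      (l := (PySem.List.slice line.toList none (some sym_idx)).reverse)).length_le
  rw [show (((PySem.List.slice line.toList none (some sym_idx)).length : Int)
        - (((PySem.List.slice line.toList none (some sym_idx)).reverse.takeWhile PySem.Chars.isdigit).length : Int))
      = (((PySem.List.slice line.toList none (some sym_idx)).length
          - ((PySem.List.slice line.toList none (some sym_idx)).reverse.takeWhile PySem.Chars.isdigit).length : Nat) : Int) by omega]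
  rw [PySem.List.slice_from_natCast, PySem.List.slice_to_natCast]
  rw [pvDrop_sub_takeWhile, pvTake_takeWhile_len]

-- ===== VERDICT (by name: the statement is the Claim_ definition above) =====
theorem check_sides_part_two_spec : Claim_equal_check_sides_part_two := by
  intro sym_idx line list_idx _hdom hpre
  unfold Spec_check_sides_part_two
  rw [pvAlt_canon]
  set l := line.toList with hl
  simp only [check_sides_part_two, ← hl]
  rcases hpre with ⟨h0, hlt⟩ | ⟨hb1, hb2, hc1, hc2⟩
  · -- in-range sym_idx
    obtain ⟨s', rfl⟩ : ∃ s' : Nat, sym_idx = (s' : Int) :=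
      ⟨sym_idx.toNat, (Int.toNat_of_nonneg h0).symm⟩
    have hs : s' < l.length := by exact_mod_cast hlt
    rw [PySem.List.slice_to_natCast]
    rw [show ((s' : Int) + 1) = ((s' + 1 : Nat) : Int) by push_cast; ring]
    rw [PySem.List.slice_from_natCast]
    rw [pvALoop_down l s' (le_of_lt hs), pvALoop_up l (s' + 1)]
    · congr 1
      · -- left side
        rcases Nat.eq_zero_or_pos s' with hz | hz
        · subst hz; simp
        · obtain ⟨k, rfl⟩ : ∃ k, s' = k + 1 := ⟨s' - 1, by omega⟩
          have hk : k < l.length := by omega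
          rw [show ((k + 1 : Nat) : Int) - 1 = (k : Int) by push_cast; ring]
          rw [PySem.List.pyGet?_natCast]
          simp only [List.getElem?_eq_getElem hk]
          have htake : (l.take (k + 1)).reverse = l[k] :: (l.take k).reverse := by
            rw [List.take_add_one, List.getElem?_eq_getElem hk]; simp
          rw [htake]
          by_cases hd : PySem.Chars.isdigit l[k]
          · simp [hd]
            omega
          · simp [hd]
      · -- right side
        rcases Nat.lt_or_ge (s' + 1) l.length with hs1 | hs1
        · have hne : ((s' : Int)) ≠ (l.length : Int) - 1 := by omega
          rw [PySem.List.pyGet?_natCast]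
          simp only [List.getElem?_eq_getElem hs1]
          have hdrop : l.drop (s' + 1) = l[s' + 1] :: l.drop (s' + 2) := List.drop_eq_getElem_cons hs1
          rw [hdrop]
          by_cases hd : PySem.Chars.isdigit l[s' + 1]
          · simp [hd, hne, hs1]
          · simp [hd]
        · have heq : s' + 1 = l.length := by omega
          have hzero : ((s' : Int)) = (l.length : Int) - 1 := by omega
          rw [show l.drop (s' + 1) = ([] : List Char) by rw [heq]; simp]
          simp [hzero]
    · omega
  · -- negative sym_idx with non-digit (wrapped) neighbour characters: both sides are []
    rw [← hl] at hb1 hc1 hc2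
    have hn2 : 2 ≤ l.length := by omega
    obtain ⟨k, rfl⟩ : ∃ k : Nat, sym_idx = -(k : Int) := ⟨(-sym_idx).toNat, by omega⟩
    have hk1 : 1 ≤ k := by omega
    have hkn : k + 1 ≤ l.length := by omega
    have hm1 : l.length - (k + 1) < l.length := by omega
    -- the left neighbour character (Python wrap-around index sym_idx - 1) is not a digit
    have hgl : PySem.List.pyGet? l (-(k : Int) - 1) = some (l[l.length - (k + 1)]'hm1) := by
      rw [show (-(k : Int) - 1) = -((k + 1 : Nat) : Int) by push_cast; ring]
      rw [PySem.List.pyGet?_neg_natCast l (k + 1) (by omega) hkn]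
      exact List.getElem?_eq_getElem hm1
    have hdl : PySem.Chars.isdigit (l[l.length - (k + 1)]'hm1) = false := by
      rw [hgl] at hc1; simpa using hc1
    -- B's left slice ends with that character
    rw [PySem.List.slice_to_neg_natCast l k (by omega)]
    have htakeL : (l.take (l.length - k)).reverse
        = l[l.length - (k + 1)]'hm1 :: (l.take (l.length - (k + 1))).reverse := by
      rw [show l.length - k = (l.length - (k + 1)) + 1 by omega]
      rw [List.take_add_one, List.getElem?_eq_getElem hm1]; simp
    rw [htakeL, hgl]
    have hne2 : (-(k : Int)) ≠ (l.length : Int) - 1 := by omega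
    -- the right neighbour character (wrap-around index sym_idx + 1) is not a digit
    by_cases hk2 : k = 1
    · subst hk2
      have h0 : (-(((1 : Nat)) : Int) + 1) = (0 : Int) := by norm_num
      rw [h0] at hc2 ⊢
      have hd0 : 0 < l.length := by omega
      have hdropR : l.drop 0 = l[0]'hd0 :: l.drop 1 := List.drop_eq_getElem_cons hd0
      have hgr : PySem.List.pyGet? l (0 : Int) = some (l[0]'hd0) := by
        rw [PySem.List.pyGet?_zero]; exact List.getElem?_eq_getElem hd0
      have hdr : PySem.Chars.isdigit (l[0]'hd0) = false := by
        rw [hgr] at hc2; simpa using hc2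
      rw [hgr]
      have hslice : PySem.List.slice l (some (0 : Int)) none = l[0]'hd0 :: l.drop 1 := by
        rw [show ((0 : Int)) = ((0 : Nat) : Int) by norm_num, PySem.List.slice_from_natCast l 0]
        simpa using hdropR
      rw [hslice]
      simp [hdl, hdr]
    · have hk2' : 2 ≤ k := by omega
      have hsub : (-(k : Int) + 1) = -(((k - 1 : Nat)) : Int) := by
        have : ((k - 1 : Nat) : Int) = (k : Int) - 1 := by omega
        omega
      rw [hsub] at hc2 ⊢
      have hm2 : l.length - (k - 1) < l.length := by omega
      have hgr : PySem.List.pyGet? l (-(((k - 1 : Nat)) : Int)) = some (l[l.length - (k - 1)]'hm2) := by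
        rw [PySem.List.pyGet?_neg_natCast l (k - 1) (by omega) (by omega)]
        exact List.getElem?_eq_getElem hm2
      have hdr : PySem.Chars.isdigit (l[l.length - (k - 1)]'hm2) = false := by
        rw [hgr] at hc2; simpa using hc2
      rw [hgr]
      rw [PySem.List.slice_from_neg_natCast l (k - 1) (by omega)]
      have hdropR : l.drop (l.length - (k - 1)) = l[l.length - (k - 1)]'hm2 :: l.drop (l.length - (k - 1) + 1) :=
        List.drop_eq_getElem_cons hm2
      rw [hdropR]
      simp [hdl, hdr]
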